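-- pv_equiv track=rewrite | github.com/kreimben/Coding-Test | programmers.kr/카드 게임.py | solution
-- ===== SOURCE A (Python) =====
-- def two_sum(target: int, nums: [int]) -> (int, int):
--     for i, num in enumerate(nums):
--         if target - num in nums:
--             find = nums.index(target - num)
--             return (nums[find], num) if nums[find] < num else (num, nums[find])
--     return None, None
--
-- def solution(coin: int, cards: [int]):
--     # 맨 처음에 n/3개를 가짐.
--     N = len(cards)
--     initial_amount = N // 3
--
--     have = []
--     for _ in range(initial_amount):
--         have.append(cards.pop(0))
--
--     round = 1
--     target = N + 1
--     while coin >= 0 and cards: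
--         temp = []
--         while len(temp) < 2 and cards:
--             temp.append(cards.pop(0))
--         # two sum
--         one, two = two_sum(target, have + temp)
--         if one is None and two is None:
--             return round
--         else:
--             if one in temp:
--                 if coin > 0:
--                     coin -= 1
--                     temp.remove(one)
--                     have.append(one)
--                 else:
--                     return round
--             if two in temp:
--                 if coin > 0:
--                     coin -= 1
--                     temp.remove(two)
--                     have.append(two)
--                 else:
--                     return round
--
--             have += temp
--
--             if one in have:
--                 have.remove(one)
--             if two in have:
--                 have.remove(two)
--
--         round += 1
--
--     return round
-- ===== SOURCE B (Python) =====
-- # B: set-based complement lookup replaces the quadratic scan+index in two_sum,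
-- # and slicing replaces repeated pop(0); B does not mutate `cards` (A empties it
-- # in place) — the equivalence is about the return value only.
--
-- def _pair(target, nums):
--     present = set(nums)
--     for num in nums:
--         c = target - num
--         if c in present:
--             return (c, num) if c < num else (num, c)
--     return None, None
--
--
-- def solution(coin, cards):
--     n = len(cards)
--     target = n + 1
--     have = cards[: n // 3]
--     rest = cards[n // 3:]
--     rounds = 1
--     while coin >= 0 and rest:
--         temp, rest = rest[:2], rest[2:]
--         one, two = _pair(target, have + temp)
--         if one is None:
--             return rounds
--         for x in (one, two):
--             if x in temp:
--                 if coin <= 0: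
--                     return rounds
--                 coin -= 1
--                 temp.remove(x)
--                 have.append(x)
--         have += temp
--         if one in have:
--             have.remove(one)
--         if two in have:
--             have.remove(two)
--         rounds += 1
--     return rounds
-- ===== Notes on version B (the rewrite author's own statement) =====
-- stated objective: faster
-- what changed: two_sum's per-element membership scan plus .index pass is replaced by one set of the values (the matched element always equals target-num, so no indexing at all), and the repeated pop(0) list shifts are replaced by slicing; B also does not mutate the caller's cards list.
import Mathlib
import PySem

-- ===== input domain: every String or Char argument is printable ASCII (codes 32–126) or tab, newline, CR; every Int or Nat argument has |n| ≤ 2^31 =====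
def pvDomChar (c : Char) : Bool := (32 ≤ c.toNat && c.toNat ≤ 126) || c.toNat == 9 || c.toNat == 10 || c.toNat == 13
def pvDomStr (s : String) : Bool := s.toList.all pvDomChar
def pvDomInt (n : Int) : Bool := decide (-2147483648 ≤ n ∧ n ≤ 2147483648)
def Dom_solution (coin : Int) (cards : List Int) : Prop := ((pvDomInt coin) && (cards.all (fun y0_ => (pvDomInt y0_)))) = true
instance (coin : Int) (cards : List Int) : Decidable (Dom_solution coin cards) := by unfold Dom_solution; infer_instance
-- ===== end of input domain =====

-- B replaces two_sum's inner membership scan + .index pass by a set of the values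
-- (the found element always EQUALS target-num, so no indexing is needed) and the
-- repeated pop(0) by slicing; equivalence is about the RETURN value only — A
-- empties `cards` in place, B leaves it untouched.

-- ===== PORT A =====

-- two_sum: for i, num in enumerate(nums): if target - num in nums: find = nums.index(...); ...
def twoSumAGo (target : Int) (nums : List Int) : List Int → Option (Int × Int)
  | [] => none
  | num :: rest =>
    if nums.contains (target - num) then
      match PySem.List.index? nums (target - num) with
      | some find =>
        match PySem.List.pyGet? nums (Int.ofNat find) with
        | some v => some (if v < num then (v, num) else (num, v))
        | none => none   -- unreachable: index? returns an in-range index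
      | none => none     -- unreachable: membership was just checked
    else twoSumAGo target nums rest

def twoSumA (target : Int) (nums : List Int) : Option (Int × Int) :=
  twoSumAGo target nums nums

-- for _ in range(initial_amount): have.append(cards.pop(0))
def popFrontA : Nat → List Int × List Int → List Int × List Int
  | 0, st => st
  | k + 1, (haveL, cs) =>
    match cs with
    | [] => (haveL, [])          -- unreachable in A: k ≤ len(cards)
    | c :: cs' => popFrontA k (haveL ++ [c], cs')

-- while len(temp) < 2 and cards: temp.append(cards.pop(0))
def takeTempA (temp : List Int) (cs : List Int) : List Int × List Int :=
  if temp.length < 2 then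
    match cs with
    | [] => (temp, [])
    | c :: cs' => takeTempA (temp ++ [c]) cs'
  else (temp, cs)
termination_by cs.length

-- needed by loopA's termination: the inner pop loop consumes at least one card
theorem takeTempA_nil_eq (cs : List Int) :
    takeTempA [] cs = (cs.take 2, cs.drop 2) := by
  rcases cs with _ | ⟨a, _ | ⟨b, t⟩⟩ <;> simp [takeTempA.eq_def]

-- the main while loop of A, sequential mutation transliterated by rebinding
def loopA (target : Int) (coin : Int) (haveL cards : List Int) (round : Int) : Int :=
  if h : coin ≥ 0 ∧ cards ≠ [] then
    let tc := takeTempA [] cards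
    match twoSumA target (haveL ++ tc.1) with
    | none => round
    | some (one, two) =>
      -- if one in temp: if coin > 0: ... else: return round
      match (if tc.1.contains one then
               if coin > 0 then
                 some (coin - 1, (PySem.List.remove? tc.1 one).getD tc.1, haveL ++ [one])
               else none
             else some (coin, tc.1, haveL)) with
      | none => round
      | some (coin1, temp1, have1) =>
        -- if two in temp: if coin > 0: ... else: return round
        match (if temp1.contains two then
                 if coin1 > 0 then
                   some (coin1 - 1, (PySem.List.remove? temp1 two).getD temp1, have1 ++ [two])
                 else none
               else some (coin1, temp1, have1)) with
        | none => round
        | some (coin2, temp2, have2) =>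
          let have3 := have2 ++ temp2
          let have4 := if have3.contains one then (PySem.List.remove? have3 one).getD have3 else have3
          let have5 := if have4.contains two then (PySem.List.remove? have4 two).getD have4 else have4
          loopA target coin2 have5 tc.2 (round + 1)
  else round
termination_by cards.length
decreasing_by
  rw [takeTempA_nil_eq]
  rcases cards with _ | ⟨c, cs⟩
  · exact absurd rfl h.2
  · simp

def solution (coin : Int) (cards : List Int) : Int :=
  let N := cards.length               -- N = len(cards) ≥ 0, so N // 3 is Nat division
  let st := popFrontA (N / 3) ([], cards)
  loopA ((N : Int) + 1) coin st.1 st.2 1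

-- ===== PORT B =====

-- _pair: present = set(nums); first num whose complement c is present; (c, num) ordered
def pairBGo (target : Int) (present : PySem.Set Int) : List Int → Option (Int × Int)
  | [] => none
  | num :: rest =>
    let c := target - num
    if PySem.Set.contains present c then some (if c < num then (c, num) else (num, c))
    else pairBGo target present rest

def pairB (target : Int) (nums : List Int) : Option (Int × Int) :=
  pairBGo target (PySem.Set.ofList nums) nums

-- one iteration of `for x in (one, two): ...` (None = early `return rounds`)
def stepB (st : Int × List Int × List Int) (x : Int) : Option (Int × List Int × List Int) :=
  if st.2.1.contains x then
    if st.1 ≤ 0 then none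
    else some (st.1 - 1, (PySem.List.remove? st.2.1 x).getD st.2.1, st.2.2 ++ [x])
  else some st

-- `if x in have: have.remove(x)`
def dropIfMemB (l : List Int) (x : Int) : List Int :=
  (PySem.List.remove? l x).getD l

def loopB (target : Int) (coin : Int) (haveL rest : List Int) (rounds : Int) : Int :=
  if h : coin ≥ 0 ∧ rest ≠ [] then
    let temp := PySem.List.slice rest none (some 2)
    let rest2 := PySem.List.slice rest (some 2) none
    match pairB target (haveL ++ temp) with
    | none => rounds
    | some (one, two) =>
      match (stepB (coin, temp, haveL) one).bind (fun st => stepB st two) with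
      | none => rounds
      | some (coin2, temp2, have2) =>
        loopB target coin2 (dropIfMemB (dropIfMemB (have2 ++ temp2) one) two) rest2 (rounds + 1)
  else rounds
termination_by rest.length
decreasing_by
  rw [PySem.List.slice_from _ (by omega : (0:Int) ≤ 2)]
  rcases rest with _ | ⟨c, cs⟩
  · exact absurd rfl h.2
  · simp

def solution_alt (coin : Int) (cards : List Int) : Int :=
  let n := cards.length
  let k : Int := PySem.Int.floordiv (n : Int) 3
  let haveL := PySem.List.slice cards none (some k)
  let rest := PySem.List.slice cards (some k) none
  loopB ((n : Int) + 1) coin haveL rest 1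

-- ===== PRECONDITION & SPEC =====
def Spec_solution (coin : Int) (cards : List Int) (out : Int) : Prop := out = solution_alt coin cards
instance (coin : Int) (cards : List Int) (out : Int) : Decidable (Spec_solution coin cards out) := by unfold Spec_solution; infer_instance

-- ===== CLAIM (what is proved, stated in full; the proofs are below) =====
def Claim_equal_solution : Prop := ∀ (coin : Int) (cards : List Int), Dom_solution coin cards → Spec_solution coin cards (solution coin cards)

-- ===== LEMMAS AND PROOFS =====

theorem twoSumGo_eq_pairGo (target : Int) (nums : List Int) (l : List Int) :
    twoSumAGo target nums l = pairBGo target (PySem.Set.ofList nums) l := by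
  induction l with
  | nil => rfl
  | cons num rest ih =>
    rw [twoSumAGo, pairBGo]
    by_cases hm : (target - num) ∈ nums
    · have hca : nums.contains (target - num) = true := by
        simpa using hm
      have hcb : PySem.Set.contains (PySem.Set.ofList nums) (target - num) = true := by
        rw [PySem.Set.contains_iff, PySem.Set.mem_ofList]; exact hm
      rw [hca, hcb]
      simp only [if_true]
      have hidx : (PySem.List.index? nums (target - num)).isSome := by
        rw [PySem.List.index?_isSome_iff]; exact hm
      obtain ⟨i, hi⟩ := Option.isSome_iff_exists.mp hidx
      obtain ⟨hk, hv, -⟩ := PySem.List.getElem_of_index?_eq_some hi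
      have hg : PySem.List.pyGet? nums (Int.ofNat i) = some (target - num) := by
        rw [show (Int.ofNat i) = (i : Int) from rfl, PySem.List.pyGet?_natCast,
          List.getElem?_eq_getElem hk, hv]
      simp only [hi, hg]
    · have hca : nums.contains (target - num) = false := by
        simpa using hm
      have hcb : PySem.Set.contains (PySem.Set.ofList nums) (target - num) = false := by
        rw [← Bool.not_eq_true, PySem.Set.contains_iff, PySem.Set.mem_ofList]; exact hm
      rw [hca, hcb]
      simpa using ih

theorem twoSum_eq_pair (target : Int) (nums : List Int) :
    twoSumA target nums = pairB target nums := by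
  rw [twoSumA, pairB, twoSumGo_eq_pairGo]

theorem popFrontA_eq (k : Nat) (h cs : List Int) :
    popFrontA k (h, cs) = (h ++ cs.take k, cs.drop k) := by
  induction k generalizing h cs with
  | zero => simp [popFrontA]
  | succ k ih =>
    rcases cs with _ | ⟨c, cs'⟩
    · simp [popFrontA]
    · rw [popFrontA, ih]; simp

theorem stepA_eq_stepB (coin x : Int) (temp haveL : List Int) :
    (if temp.contains x then
       if coin > 0 then
         some (coin - 1, (PySem.List.remove? temp x).getD temp, haveL ++ [x])
       else none
     else some (coin, temp, haveL)) = stepB (coin, temp, haveL) x := by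
  rw [stepB]
  by_cases hc : temp.contains x
  · rw [if_pos hc, if_pos hc]
    by_cases hp : coin > 0
    · rw [if_pos hp, if_neg (by omega : ¬ coin ≤ 0)]
    · rw [if_neg hp, if_pos (by omega : coin ≤ 0)]
  · rw [if_neg hc, if_neg hc]

theorem dropIf_eq (l : List Int) (x : Int) :
    (if l.contains x then (PySem.List.remove? l x).getD l else l) = dropIfMemB l x := by
  rw [dropIfMemB]
  by_cases hc : l.contains x
  · rw [if_pos hc]
  · rw [if_neg hc]
    have : PySem.List.remove? l x = none := by
      rw [PySem.List.remove?_eq_none_iff]; simpa using hc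
    rw [this, Option.getD_none]

theorem loopA_eq_loopB_fuel (n : Nat) : ∀ (cards : List Int), cards.length ≤ n →
    ∀ (target coin : Int) (haveL : List Int) (round : Int),
    loopA target coin haveL cards round = loopB target coin haveL cards round := by
  induction n with
  | zero =>
    intro cards hlen target coin haveL round
    have hnil : cards = [] := List.length_eq_zero_iff.mp (Nat.le_zero.mp hlen)
    subst hnil
    rw [loopA, loopB]
    simp
  | succ n ih =>
    intro cards hlen target coin haveL round
    rw [loopA, loopB]
    by_cases hc : coin ≥ 0 ∧ cards ≠ []
    · rw [dif_pos hc, dif_pos hc]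
      simp only [takeTempA_nil_eq,
        PySem.List.slice_to _ (by omega : (0:Int) ≤ 2),
        PySem.List.slice_from _ (by omega : (0:Int) ≤ 2),
        show ((2:Int)).toNat = 2 from rfl]
      rw [twoSum_eq_pair]
      cases hpair : pairB target (haveL ++ cards.take 2) with
      | none => rfl
      | some p =>
        obtain ⟨one, two⟩ := p
        simp only [stepA_eq_stepB]
        cases hst1 : stepB (coin, cards.take 2, haveL) one with
        | none => simp
        | some st1 =>
          obtain ⟨coin1, temp1, have1⟩ := st1
          simp only [Option.bind]
          cases hst2 : stepB (coin1, temp1, have1) two with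
          | none => rfl
          | some st2 =>
            obtain ⟨coin2, temp2, have2⟩ := st2
            simp only [dropIf_eq]
            exact ih (cards.drop 2) (by simp; omega) target coin2 _ (round + 1)
    · rw [dif_neg hc, dif_neg hc]

theorem loopA_eq_loopB (target : Int) (cards : List Int) (coin : Int)
    (haveL : List Int) (round : Int) :
    loopA target coin haveL cards round = loopB target coin haveL cards round :=
  loopA_eq_loopB_fuel cards.length cards (Nat.le_refl _) target coin haveL round

-- ===== VERDICT (by name: the statement is the Claim_ definition above) =====
theorem solution_spec : Claim_equal_solution := by
  intro coin cards _
  unfold Spec_solution solution solution_alt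
  simp only [popFrontA_eq, List.nil_append]
  have hk : PySem.Int.floordiv (cards.length : Int) 3 = ((cards.length / 3 : Nat) : Int) := by
    simp [PySem.Int.floordiv, Int.fdiv_eq_ediv]
  rw [hk, PySem.List.slice_to _ (by positivity), PySem.List.slice_from _ (by positivity)]
  simp only [Int.toNat_natCast]
  exact loopA_eq_loopB _ _ _ _ _
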